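-- pv_equiv track=rewrite | github.com/wll1014/KKB | yunwei/ops_server/platmonitor/dsl/DevConfBasicInfo.py | find_constant_0
-- ===== SOURCE A (Python) =====
-- def find_constant_0(data):
--     """
--     找到列表里值为0的索引段
--     :param data:
--     :return:
--     """
--
--     def find_first_0(a_list, start):
--         try:
--             start = a_list.index(0, start)
--         except ValueError:
--             return None
--
--         end = None
--         for i in range(start, len(a_list)):
--             if a_list[i] != 0:
--                 end = i
--                 break
--         return [start, end]
--
--     time_dur = []
--     begin = 0
--     while True:
--         start_index = find_first_0(data, begin)
--         if start_index is None:
--             break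
--         elif start_index[1] is None:
--             time_dur.append(start_index)
--             break
--         else:
--             time_dur.append([start_index[0], start_index[1] - 1])
--             begin = start_index[1]
--     return time_dur
-- ===== SOURCE B (Python) =====
-- def find_constant_0(data):
--     """
--     找到列表里值为0的索引段
--     :param data:
--     :return:
--     """
--     res = []
--     start = None
--     i = 0
--     for v in data:
--         if v == 0:
--             if start is None:
--                 start = i
--         else:
--             if start is not None:
--                 res.append([start, i - 1])
--                 start = None
--         i += 1
--     if start is not None:
--         res.append([start, i - 1])
--     return res
-- ===== Notes on version B (the rewrite author's own statement) =====
-- stated objective: simpler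
-- what changed: Replaces A's restarting while-loop (repeated list.index(0, begin) searches plus an inner scan for the run's end) with one linear pass that keeps a 'start of current zero-run' marker and emits a segment when the run ends; Pre_ excludes lists whose last element is 0, on which A returns [start, None] (a list containing None, not a value of the declared list-of-int-pairs type) while B returns [start, len-1].
-- outside the precondition, e.g. on find_constant_0([0]): A returns [[0, None]], B returns [[0, 0]]; on find_constant_0([1, 0, 0]): A returns [[1, None]], B returns [[1, 2]]
import Mathlib
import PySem

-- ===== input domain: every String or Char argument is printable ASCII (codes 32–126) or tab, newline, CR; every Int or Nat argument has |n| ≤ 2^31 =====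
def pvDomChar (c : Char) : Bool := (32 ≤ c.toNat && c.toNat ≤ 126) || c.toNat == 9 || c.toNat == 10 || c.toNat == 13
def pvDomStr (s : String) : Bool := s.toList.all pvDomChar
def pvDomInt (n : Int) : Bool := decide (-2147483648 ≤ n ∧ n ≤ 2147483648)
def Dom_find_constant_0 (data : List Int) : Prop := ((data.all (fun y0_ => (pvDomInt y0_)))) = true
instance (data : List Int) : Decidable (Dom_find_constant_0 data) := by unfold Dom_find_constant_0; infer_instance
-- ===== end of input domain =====

-- B replaces A's restarting index()-search loop with a single linear pass keeping a run-start marker (simpler);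
-- Pre_ excludes lists ending in 0, where A returns a [start, None] pair that is not a list of ints.


-- ===== PORT A =====
-- inner 'for i in range(start, len(a_list)): if a_list[i] != 0: end = i; break'
def pvScanEnd (l : List Int) (i : Nat) : Option Int :=
  if h : i < l.length then
    if l[i] ≠ 0 then some (i : Int) else pvScanEnd l (i + 1)
  else none
termination_by l.length - i

-- find_first_0(a_list, start); 'a_list.index(0, start)' ported by hand as start + index? (drop start) 0,
-- exact for 0 ≤ start (A only calls it with begin ≥ 0)
def pvFindFirst0 (l : List Int) (start : Int) : Option (Int × Option Int) :=
  match PySem.List.index? (l.drop start.toNat) 0 with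
  | none => none
  | some k =>
    let s : Int := start + k
    some (s, pvScanEnd l s.toNat)

-- the 'while True' loop; fuel = len(data)+1 suffices because begin strictly increases.
-- In the (s, none) branch Python appends [start, None] — not a list of ints; that branch is
-- outside Pre_find_constant_0, ported as [[s]].
def pvALoop (data : List Int) (fuel : Nat) (begin_ : Int) (acc : List (List Int)) : List (List Int) :=
  match fuel with
  | 0 => acc
  | fuel + 1 =>
    match pvFindFirst0 data begin_ with
    | none => acc
    | some (s, none) => acc ++ [[s]]
    | some (s, some e) => pvALoop data fuel e (acc ++ [[s, e - 1]])

def find_constant_0 (data : List Int) : List (List Int) :=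
  pvALoop data (data.length + 1) 0 []

-- ===== PORT B =====
def pvBLoop (l : List Int) (i : Int) (start : Option Int) (acc : List (List Int)) : List (List Int) :=
  match l with
  | [] =>
    match start with
    | none => acc
    | some s => acc ++ [[s, i - 1]]
  | v :: rest =>
    if v = 0 then
      pvBLoop rest (i + 1) (match start with | none => some i | some s => some s) acc
    else
      match start with
      | none => pvBLoop rest (i + 1) none acc
      | some s => pvBLoop rest (i + 1) none (acc ++ [[s, i - 1]])

def find_constant_0_alt (data : List Int) : List (List Int) :=
  pvBLoop data 0 none []

-- ===== PRECONDITION & SPEC =====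
-- Pre_ excludes lists whose last element is 0: there A's trailing zero-run yields [start, None],
-- a list containing None rather than a value of the declared List (List Int) type.
def Pre_find_constant_0 (data : List Int) : Prop := data.getLast? ≠ some 0
instance (data : List Int) : Decidable (Pre_find_constant_0 data) := by unfold Pre_find_constant_0; infer_instance

def pvWitness_find_constant_0 : List Int := [1, 0, 0, 2, 0, 3]

def Spec_find_constant_0 (data : List Int) (out : List (List Int)) : Prop := out = find_constant_0_alt data
instance (data : List Int) (out : List (List Int)) : Decidable (Spec_find_constant_0 data out) := by unfold Spec_find_constant_0; infer_instance

-- ===== CLAIM (what is proved, stated in full; the proofs are below) =====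
def Claim_equal_find_constant_0 : Prop := ∀ (data : List Int), Dom_find_constant_0 data → Pre_find_constant_0 data → Spec_find_constant_0 data (find_constant_0 data)

-- ===== LEMMAS AND PROOFS =====

-- B skips a zero-free prefix with start = none without emitting anything
theorem pvBLoop_skip_nonzero (p : List Int) (t : List Int) (j : Int) (acc : List (List Int))
    (hp : ∀ x ∈ p, x ≠ 0) :
    pvBLoop (p ++ t) j none acc = pvBLoop t (j + p.length) none acc := by
  induction p generalizing j with
  | nil => simp
  | cons v p ih =>
    have hv : v ≠ 0 := hp v (by simp)
    simp only [List.cons_append, pvBLoop, if_neg hv]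
    rw [ih (j + 1) (fun x hx => hp x (by simp [hx]))]
    congr 1
    push_cast [List.length_cons]
    omega

-- B skips zeros while already inside a run
theorem pvBLoop_skip_zeros (z : List Int) (t : List Int) (j s : Int) (acc : List (List Int))
    (hz : ∀ x ∈ z, x = 0) :
    pvBLoop (z ++ t) j (some s) acc = pvBLoop t (j + z.length) (some s) acc := by
  induction z generalizing j with
  | nil => simp
  | cons v z ih =>
    have hv : v = 0 := hz v (by simp)
    simp only [List.cons_append, pvBLoop, if_pos hv]
    rw [ih (j + 1) (fun x hx => hz x (by simp [hx]))]
    congr 1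
    push_cast [List.length_cons]
    omega

-- a nonempty all-zero list ends in 0
theorem pv_getLast_all_zero (l : List Int) (hne : l ≠ []) (hz : ∀ x ∈ l, x = 0) :
    l.getLast? = some 0 := by
  rw [List.getLast?_eq_some_getLast (h := hne)]
  rw [hz (l.getLast hne) (List.getLast_mem hne)]

-- the scan finds the first nonzero at offset z.length
theorem pvScanEnd_some (data : List Int) (s : Nat) (z : List Int) (v : Int) (r : List Int)
    (hd : data.drop s = z ++ v :: r) (hz : ∀ x ∈ z, x = 0) (hv : v ≠ 0) :
    pvScanEnd data s = some ((s + z.length : Nat) : Int) := by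
  induction z generalizing s with
  | nil =>
    have hlt : s < data.length := by
      by_contra h
      rw [List.drop_eq_nil_of_le (by omega)] at hd
      simp at hd
    have hget : data[s] = v := by
      have := List.getElem_drop (xs := data) (i := s) (j := 0) (h := by simp [hd])
      simpa [hd] using this.symm
    rw [pvScanEnd]
    simp [hlt, hget, hv]
  | cons w z ih =>
    have hw : w = 0 := hz w (by simp)
    have hlt : s < data.length := by
      by_contra h
      rw [List.drop_eq_nil_of_le (by omega)] at hd
      simp at hd
    have hget : data[s] = w := by
      have := List.getElem_drop (xs := data) (i := s) (j := 0) (h := by simp [hd])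
      simpa [hd] using this.symm
    have hd' : data.drop (s + 1) = z ++ v :: r := by
      have : data.drop (s + 1) = (data.drop s).drop 1 := by
        rw [List.drop_drop]
      rw [this, hd]
      simp
    rw [pvScanEnd]
    simp only [hlt, dif_pos, hget, hw]
    rw [if_neg (by simp)]
    rw [ih (s + 1) hd' (fun x hx => hz x (by simp [hx]))]
    congr 1
    simp [List.length_cons]
    omega

-- the scan returns none when everything from s on is zero
theorem pvScanEnd_none (data : List Int) (s : Nat) (hz : ∀ x ∈ data.drop s, x = 0) :
    pvScanEnd data s = none := by
  by_cases hlt : s < data.length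
  · have hget : data[s] = 0 := by
      apply hz
      have hd : (data.drop s)[0]'(by simp; omega) = data[s] := by
        simpa using List.getElem_drop (xs := data) (i := s) (j := 0)
      rw [← hd]
      exact List.getElem_mem _
    rw [pvScanEnd]
    simp only [hlt, dif_pos, hget]
    rw [if_neg (by simp)]
    exact pvScanEnd_none data (s + 1) (fun x hx => hz x (by
      have : data.drop (s + 1) = (data.drop s).drop 1 := by rw [List.drop_drop]
      rw [this] at hx
      exact List.mem_of_mem_drop hx))
  · rw [pvScanEnd]
    simp [hlt]
termination_by data.length - s

-- getLast? of a nonempty suffix is getLast? of the whole list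
theorem pv_getLast_drop (data : List Int) (s : Nat) (h : data.drop s ≠ []) :
    data.getLast? = (data.drop s).getLast? := by
  conv_lhs => rw [← List.take_append_drop s data]
  exact List.getLast?_append_of_ne_nil _ h

-- B returns acc on a zero-free list (start = none)
theorem pvBLoop_no_zero (l : List Int) (j : Int) (acc : List (List Int))
    (h : ∀ x ∈ l, x ≠ 0) : pvBLoop l j none acc = acc := by
  have := pvBLoop_skip_nonzero l [] j acc h
  simpa [pvBLoop] using this

-- main bridge: A's fueled while-loop from position i equals B's pass over the suffix
theorem pv_main (fuel : Nat) (data : List Int) (i : Nat) (acc : List (List Int))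
    (hi : i ≤ data.length) (hfuel : data.length - i < fuel)
    (hpre : data.getLast? ≠ some 0) :
    pvALoop data fuel (i : Int) acc = pvBLoop (data.drop i) (i : Int) none acc := by
  match fuel with
  | 0 => omega
  | fuel + 1 =>
    have htonat : ((i : Int)).toNat = i := by omega
    match hidx : PySem.List.index? (data.drop i) 0 with
    | none =>
      have hff : pvFindFirst0 data (i : Int) = none := by
        simp only [pvFindFirst0, htonat, hidx]
      rw [pvALoop, hff]
      have hnz : ∀ x ∈ data.drop i, x ≠ 0 := by
        intro x hx hx0
        have := (PySem.List.index?_eq_none_iff (data.drop i) 0).mp hidx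
        exact this (hx0 ▸ hx)
      exact (pvBLoop_no_zero _ _ _ hnz).symm
    | some k =>
      have hff : pvFindFirst0 data (i : Int) = some ((i : Int) + (k : Int),
          pvScanEnd data ((i : Int) + (k : Int)).toNat) := by
        simp only [pvFindFirst0, htonat, hidx]
      rw [pvALoop, hff]
      obtain ⟨pre, suf, hsplit, hklen, hknot⟩ := (PySem.List.index?_eq_some_iff (data.drop i) 0 k).mp hidx
      have hprenz : ∀ x ∈ pre, x ≠ 0 := fun x hx hx0 => hknot (hx0 ▸ hx)
      -- decompose suf into its maximal zero prefix z' and the rest r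
      obtain ⟨z', r, hsufzr, hz'zero, hrprop⟩ :
          ∃ z' r, z' ++ r = suf ∧ (∀ x ∈ z', x = 0) ∧ (r = [] ∨ ∃ v r', r = v :: r' ∧ v ≠ 0) := by
        refine ⟨suf.takeWhile (fun x => x == 0), suf.dropWhile (fun x => x == 0),
          List.takeWhile_append_dropWhile, ?_, ?_⟩
        · intro x hx
          simpa using List.mem_takeWhile_imp hx
        · match hdw : suf.dropWhile (fun x => x == 0) with
          | [] => exact Or.inl rfl
          | v :: r' =>
            refine Or.inr ⟨v, r', rfl, ?_⟩
            have w : suf.dropWhile (fun x => x == 0) ≠ [] := by rw [hdw]; simp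
            have := List.head_dropWhile_not (fun x => x == 0) w
            simp [hdw] at this
            exact this
      have hstoNat : ((i : Int) + (k : Int)).toNat = i + k := by omega
      have hdropik : data.drop (i + k) = 0 :: suf := by
        rw [← List.drop_drop, hsplit, ← hklen, List.drop_left]
      have hlen : i + k < data.length := by
        by_contra h
        rw [List.drop_eq_nil_of_le (by omega)] at hdropik
        simp at hdropik
      rcases hrprop with hr | ⟨v, r', hr, hv⟩
      · -- the found zero-run reaches the end of the list: contradicts Pre_
        exfalso
        have hsufz : ∀ x ∈ suf, x = 0 := by
          intro x hx
          rw [← hsufzr, hr] at hx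
          exact hz'zero x (by simpa using hx)
        have : data.getLast? = some 0 := by
          rw [pv_getLast_drop data (i + k) (by rw [hdropik]; simp)]
          exact pv_getLast_all_zero _ (by rw [hdropik]; simp) (by
            intro x hx
            rw [hdropik] at hx
            rcases List.mem_cons.mp hx with h | h
            · exact h
            · exact hsufz x h)
        exact hpre this
      · have hscan : pvScanEnd data ((i : Int) + (k : Int)).toNat
            = some ((i + k + (z'.length + 1) : Nat) : Int) := by
          rw [hstoNat]
          have hdrop2 : data.drop (i + k) = (0 :: z') ++ v :: r' := by
            rw [hdropik, ← hsufzr, hr]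
            simp
          have := pvScanEnd_some data (i + k) (0 :: z') v r' hdrop2
            (by
              intro x hx
              rcases List.mem_cons.mp hx with h | h
              · exact h
              · exact hz'zero x h) hv
          simpa using this
        rw [hscan]
        set e : Nat := i + k + (z'.length + 1) with hedef
        have hdrope : data.drop e = v :: r' := by
          rw [hedef, ← List.drop_drop (i := z'.length + 1) (j := i + k), hdropik, ← hsufzr, hr]
          have : (0 :: (z' ++ v :: r')).drop (z'.length + 1) = v :: r' := by
            simpa using List.drop_left' (l₁ := z') (l₂ := v :: r') rfl
          simpa using this
        have helen : e < data.length := by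
          by_contra h
          rw [List.drop_eq_nil_of_le (by omega)] at hdrope
          simp at hdrope
        -- LHS: recurse via IH
        have hIH := pv_main fuel data e (acc ++ [[(i : Int) + (k : Int), ((e : Nat) : Int) - 1]])
          (by omega) (by omega) hpre
        rw [hdrope] at hIH
        rw [show ((i : Int) + (k : Int)) = ((i + k : Nat) : Int) by push_cast; ring] at hIH ⊢
        show pvALoop data fuel ((e : Int)) (acc ++ [[((i + k : Nat) : Int), (e : Int) - 1]])
            = pvBLoop (data.drop i) ((i : Int)) none acc
        rw [hIH]
        -- unfold the first step of B on v :: r'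
        rw [pvBLoop, if_neg hv]
        -- RHS: walk B through pre, the zero run, and v
        rw [hsplit, ← hsufzr, hr]
        rw [show (pre ++ 0 :: (z' ++ v :: r')) = pre ++ ((0 :: z') ++ v :: r') by simp]
        rw [pvBLoop_skip_nonzero pre _ _ _ hprenz]
        rw [List.cons_append, pvBLoop, if_pos rfl]
        rw [pvBLoop_skip_zeros z' _ _ _ _ hz'zero]
        rw [pvBLoop, if_neg hv]
        rw [hklen]
        congr 2 <;> push_cast [hedef] <;> ring_nf
termination_by fuel

-- ===== VERDICT (by name: the statement is the Claim_ definition above) =====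
theorem find_constant_0_spec : Claim_equal_find_constant_0 := by
  intro data _ hpre
  unfold Spec_find_constant_0 find_constant_0 find_constant_0_alt
  have := pv_main (data.length + 1) data 0 [] (by omega) (by omega) hpre
  simpa using this
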